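-- pv_equiv track=rewrite | github.com/Grant-L/Variable-Spacetime-Impedance | src/ave/solvers/coupled_resonator.py | _fill_subshells
-- ===== SOURCE A (Python) =====
-- _AUFBAU_ORDER = [
--     (1, 0, 2),   # 1s
--     (2, 0, 2),   # 2s
--     (2, 1, 6),   # 2p
--     (3, 0, 2),   # 3s
--     (3, 1, 6),   # 3p
--     (4, 0, 2),   # 4s
--     (3, 2, 10),  # 3d
--     (4, 1, 6),   # 4p
--     (5, 0, 2),   # 5s
--     (4, 2, 10),  # 4d
--     (5, 1, 6),   # 5p
--     (6, 0, 2),   # 6s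
--     (4, 3, 14),  # 4f
--     (5, 2, 10),  # 5d
--     (6, 1, 6),   # 6p
--     (7, 0, 2),   # 7s
--     (5, 3, 14),  # 5f
--     (6, 2, 10),  # 6d
--     (7, 1, 6),   # 7p
-- ]
--
-- def _fill_subshells(n_electrons):
--     """Fill electron subshells using Aufbau (Madelung n+l) order.
--
--     Returns [(n, l, count), ...] — NOT grouped by n.
--
--     Example: O (Z=8) = [(1,0,2), (2,0,2), (2,1,4)]
--              Na (Z=11) = [(1,0,2), (2,0,2), (2,1,6), (3,0,1)]
--     """
--     result = []
--     remaining = n_electrons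
--     for n, l, capacity in _AUFBAU_ORDER:
--         if remaining <= 0:
--             break
--         count = min(remaining, capacity)
--         result.append((n, l, count))
--         remaining -= count
--     return result
-- ===== SOURCE B (Python) =====
-- _AUFBAU_ORDER = [
--     (1, 0, 2), (2, 0, 2), (2, 1, 6), (3, 0, 2), (3, 1, 6), (4, 0, 2),
--     (3, 2, 10), (4, 1, 6), (5, 0, 2), (4, 2, 10), (5, 1, 6), (6, 0, 2),
--     (4, 3, 14), (5, 2, 10), (6, 1, 6), (7, 0, 2), (5, 3, 14),
--     (6, 2, 10), (7, 1, 6),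
-- ]
--
-- def _fill_subshells(n_electrons):
--     # prefix sums of capacities: electrons consumed before each subshell
--     priors = []
--     total = 0
--     for _, _, cap in _AUFBAU_ORDER:
--         priors.append(total)
--         total += cap
--     # each subshell's count is independent of the loop state:
--     # min(capacity, n_electrons - prior), kept only when positive
--     return [
--         (n, l, min(cap, n_electrons - prior))
--         for (n, l, cap), prior in zip(_AUFBAU_ORDER, priors)
--         if min(cap, n_electrons - prior) > 0
--     ]
-- ===== Notes on version B (the rewrite author's own statement) =====
-- stated objective: alternative
-- what changed: Replaces A's stateful remaining-subtraction loop with early break by capacity prefix sums computed once, then an independent per-subshell comprehension count = min(capacity, n - prior) filtered on positivity.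
import Mathlib
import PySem

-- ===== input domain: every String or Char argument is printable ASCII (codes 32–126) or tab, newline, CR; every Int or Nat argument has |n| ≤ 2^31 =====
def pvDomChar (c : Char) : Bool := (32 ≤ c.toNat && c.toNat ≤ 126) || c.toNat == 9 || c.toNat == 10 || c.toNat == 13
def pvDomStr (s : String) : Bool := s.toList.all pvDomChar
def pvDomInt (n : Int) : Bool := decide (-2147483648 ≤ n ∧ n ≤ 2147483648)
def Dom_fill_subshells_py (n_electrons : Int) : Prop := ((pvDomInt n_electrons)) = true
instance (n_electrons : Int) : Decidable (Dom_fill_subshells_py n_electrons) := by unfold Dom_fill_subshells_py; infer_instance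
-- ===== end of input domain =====

-- B computes each subshell's count independently from capacity prefix sums
-- instead of A's mutable remaining-subtraction loop with early break (objective: alternative).

def aufbauOrder : List (Int × Int × Int) :=
  [(1, 0, 2), (2, 0, 2), (2, 1, 6), (3, 0, 2), (3, 1, 6), (4, 0, 2),
   (3, 2, 10), (4, 1, 6), (5, 0, 2), (4, 2, 10), (5, 1, 6), (6, 0, 2),
   (4, 3, 14), (5, 2, 10), (6, 1, 6), (7, 0, 2), (5, 3, 14),
   (6, 2, 10), (7, 1, 6)]

-- ===== PORT A =====
-- the for-loop with `break`: structural recursion over the table carrying `remaining`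
def aFillLoop : List (Int × Int × Int) → Int → List (Int × Int × Int)
  | [], _ => []
  | (n, l, capacity) :: rest, remaining =>
      if remaining ≤ 0 then []
      else (n, l, min remaining capacity) :: aFillLoop rest (remaining - min remaining capacity)

def fill_subshells_py (n_electrons : Int) : List (Int × Int × Int) :=
  aFillLoop aufbauOrder n_electrons

-- ===== PORT B =====
-- first pass of Source B: the list of capacity prefix sums (`priors`)
def bPriors : List (Int × Int × Int) → Int → List Int
  | [], _ => []
  | (_, _, cap) :: rest, total => total :: bPriors rest (total + cap)

def fill_subshells_py_alt (n_electrons : Int) : List (Int × Int × Int) :=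
  let priors := bPriors aufbauOrder 0
  (aufbauOrder.zip priors).filterMap (fun x =>
    if min x.1.2.2 (n_electrons - x.2) > 0 then
      some (x.1.1, x.1.2.1, min x.1.2.2 (n_electrons - x.2))
    else none)

-- ===== PRECONDITION & SPEC =====
def Spec_fill_subshells_py (n_electrons : Int) (out : List (Int × Int × Int)) : Prop := out = fill_subshells_py_alt n_electrons
instance (n_electrons : Int) (out : List (Int × Int × Int)) : Decidable (Spec_fill_subshells_py n_electrons out) := by unfold Spec_fill_subshells_py; infer_instance

-- ===== CLAIM (what is proved, stated in full; the proofs are below) =====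
def Claim_equal_fill_subshells_py : Prop := ∀ (n_electrons : Int), Dom_fill_subshells_py n_electrons → Spec_fill_subshells_py n_electrons (fill_subshells_py n_electrons)

-- ===== LEMMAS AND PROOFS =====

def bBody (ne : Int) (x : (Int × Int × Int) × Int) : Option (Int × Int × Int) :=
  if min x.1.2.2 (ne - x.2) > 0 then some (x.1.1, x.1.2.1, min x.1.2.2 (ne - x.2)) else none

theorem bZip_nil_of_nonpos (t : List (Int × Int × Int)) (ne p : Int)
    (hcap : ∀ x ∈ t, 0 < x.2.2) (h : ne - p ≤ 0) :
    (t.zip (bPriors t p)).filterMap (bBody ne) = [] := by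
  induction t generalizing p with
  | nil => simp
  | cons hd tl ih =>
    obtain ⟨n, l, c⟩ := hd
    have hc : 0 < c := hcap (n, l, c) (by simp)
    rw [show bPriors ((n, l, c) :: tl) p = p :: bPriors tl (p + c) from rfl,
        List.zip_cons_cons, List.filterMap_cons,
        show bBody ne ((n, l, c), p) = none from by simp [bBody]; omega]
    exact ih (p + c) (fun x hx => hcap x (List.mem_cons_of_mem _ hx)) (by omega)

theorem aFillLoop_nil_of_nonpos (t : List (Int × Int × Int)) (r : Int) (h : r ≤ 0) :
    aFillLoop t r = [] := by
  cases t with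
  | nil => rfl
  | cons hd tl => obtain ⟨n, l, c⟩ := hd; simp [aFillLoop, h]

theorem fill_loops_agree (t : List (Int × Int × Int)) (ne p : Int)
    (hcap : ∀ x ∈ t, 0 < x.2.2) :
    aFillLoop t (ne - p) = (t.zip (bPriors t p)).filterMap (bBody ne) := by
  induction t generalizing p with
  | nil => rfl
  | cons hd tl ih =>
    obtain ⟨n, l, c⟩ := hd
    have hc : 0 < c := hcap (n, l, c) (by simp)
    have hcap' : ∀ x ∈ tl, 0 < x.2.2 := fun x hx => hcap x (List.mem_cons_of_mem _ hx)
    rw [show bPriors ((n, l, c) :: tl) p = p :: bPriors tl (p + c) from rfl,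
        List.zip_cons_cons, List.filterMap_cons]
    by_cases h0 : ne - p ≤ 0
    · rw [show aFillLoop ((n, l, c) :: tl) (ne - p) = [] from by simp [aFillLoop, h0],
          show bBody ne ((n, l, c), p) = none from by simp [bBody]; omega]
      exact (bZip_nil_of_nonpos tl ne (p + c) hcap' (by omega)).symm
    · rw [show bBody ne ((n, l, c), p) = some (n, l, min c (ne - p)) from by
            simp only [bBody]; rw [if_pos (by omega)],
          show aFillLoop ((n, l, c) :: tl) (ne - p)
              = (n, l, min c (ne - p)) :: aFillLoop tl (ne - p - min c (ne - p)) from by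
            simp [aFillLoop, h0, min_comm]]
      by_cases hge : c ≤ ne - p
      · rw [show ne - p - min c (ne - p) = ne - (p + c) from by omega]
        exact congrArg _ (ih (p + c) hcap')
      · rw [show ne - p - min c (ne - p) = 0 from by omega,
            aFillLoop_nil_of_nonpos tl 0 le_rfl]
        exact congrArg _ (bZip_nil_of_nonpos tl ne (p + c) hcap' (by omega)).symm

-- ===== VERDICT (by name: the statement is the Claim_ definition above) =====
theorem fill_subshells_py_spec : Claim_equal_fill_subshells_py := by
  intro ne _
  unfold Spec_fill_subshells_py fill_subshells_py fill_subshells_py_alt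
  have h := fill_loops_agree aufbauOrder ne 0 (by decide)
  simpa [bBody] using h
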